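-- pv_equiv track=rewrite | github.com/danayn/kekambas-142_week4_day2 | whiteboard.py | solution
-- ===== SOURCE A (Python) =====
-- def solution(gloves):
--     output = 0
--     while len(gloves) > 0:
--         if gloves.count(gloves[0]) > 1:
--             output += 1
--             pair = gloves[0]
--             gloves.remove(pair)
--             gloves.remove(pair)
--         else:
--             single = gloves[0]
--             gloves.remove(single)
--     return output
-- ===== SOURCE B (Python) =====
-- def solution(gloves):
--     # Drain the list (A also empties `gloves`; equivalence is about the return value),
--     # building a frequency table in one pass, then sum floor(count/2) per colour.
--     counts = {}
--     while gloves: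
--         g = gloves.pop()
--         counts[g] = counts.get(g, 0) + 1
--     return sum(c // 2 for c in counts.values())
-- ===== Notes on version B (the rewrite author's own statement) =====
-- stated objective: faster
-- what changed: Replaces A's repeated count/remove scans with pair-vs-single branching by a single pop-drain pass that builds a frequency dict, then sums c // 2 over its values.
import Mathlib
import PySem

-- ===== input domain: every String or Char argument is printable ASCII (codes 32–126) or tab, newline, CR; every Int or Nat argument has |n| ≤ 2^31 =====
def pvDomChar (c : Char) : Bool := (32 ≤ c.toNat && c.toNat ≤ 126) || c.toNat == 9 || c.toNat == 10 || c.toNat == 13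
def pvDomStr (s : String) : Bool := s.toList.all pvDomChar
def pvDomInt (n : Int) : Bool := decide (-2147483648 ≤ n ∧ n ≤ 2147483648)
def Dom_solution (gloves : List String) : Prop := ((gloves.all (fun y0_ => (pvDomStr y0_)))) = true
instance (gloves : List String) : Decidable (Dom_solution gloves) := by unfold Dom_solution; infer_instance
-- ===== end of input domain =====

-- B replaces A's repeated count/remove scanning by one frequency-table pass plus a
-- sum of count // 2; both empty the argument list in Python, the theorems below are
-- about the RETURN value only.


-- ===== PORT A =====
-- while len(gloves) > 0: if gloves.count(gloves[0]) > 1 remove it twice and count a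
-- pair, else remove it once.  gloves[0] is the head; list.remove of a present element
-- is List.erase (first occurrence).
def solution : List String → Int
  | [] => 0
  | g :: t =>
    if (g :: t).count g > 1 then
      1 + solution (((g :: t).erase g).erase g)
    else
      solution ((g :: t).erase g)
termination_by l => l.length
decreasing_by
  · simp only [List.erase_cons_head]
    exact Nat.lt_succ_of_le List.length_erase_le
  · simp only [List.erase_cons_head]
    exact Nat.lt_succ_self _

-- ===== PORT B =====
-- counts = {}; while gloves: g = gloves.pop(); counts[g] = counts.get(g, 0) + 1
-- (pop() drains from the END, i.e. the loop visits the reversed list);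
-- return sum(c // 2 for c in counts.values())
def solution_alt (gloves : List String) : Int :=
  let counts := gloves.reverse.foldl (fun d g => d.insert g (d.getD g 0 + 1)) PySem.Dict.empty
  (counts.values.map (fun c => PySem.Int.floordiv c 2)).sum

-- ===== PRECONDITION & SPEC =====
def Spec_solution (gloves : List String) (out : Int) : Prop := out = solution_alt gloves
instance (gloves : List String) (out : Int) : Decidable (Spec_solution gloves out) := by unfold Spec_solution; infer_instance

-- ===== CLAIM (what is proved, stated in full; the proofs are below) =====
def Claim_equal_solution : Prop := ∀ (gloves : List String), Dom_solution gloves → Spec_solution gloves (solution gloves)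

-- ===== LEMMAS AND PROOFS =====

-- Common value: the sum over the distinct colours of ⌊count/2⌋.
def pairSum (l : List String) : Int :=
  ∑ k ∈ l.toFinset, ((l.count k / 2 : Nat) : Int)

-- pairSum may be computed over any finset containing every colour of l.
lemma pairSum_superset (l : List String) (s : Finset String) (h : l.toFinset ⊆ s) :
    pairSum l = ∑ k ∈ s, ((l.count k / 2 : Nat) : Int) := by
  unfold pairSum
  refine Finset.sum_subset h ?_
  intro x _ hx
  simp only [List.mem_toFinset] at hx
  simp [List.count_eq_zero_of_not_mem hx]

lemma solution_eq_pairSum (l : List String) : solution l = pairSum l := by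
  induction l using (solution.induct) with
  | case1 => simp [solution, pairSum]
  | case2 g t hc ih =>
    rw [solution]
    simp only [hc, if_true, ih]
    simp only [List.erase_cons_head] at *
    have hg : g ∈ t := by
      by_contra hg
      simp [List.count_cons_self, List.count_eq_zero_of_not_mem hg] at hc
    have hsub : (t.erase g).toFinset ⊆ (g :: t).toFinset := by
      intro x hx
      simp only [List.mem_toFinset, List.toFinset_cons, Finset.mem_insert] at *
      exact Or.inr (List.mem_of_mem_erase hx)
    rw [pairSum_superset _ _ hsub]
    unfold pairSum
    have hgmem : g ∈ (g :: t).toFinset := by simp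
    rw [← Finset.insert_erase hgmem, Finset.sum_insert (Finset.notMem_erase _ _),
        Finset.sum_insert (Finset.notMem_erase _ _)]
    have hcongr : ∑ k ∈ (g :: t).toFinset.erase g, (((t.erase g).count k / 2 : Nat) : Int)
        = ∑ k ∈ (g :: t).toFinset.erase g, (((g :: t).count k / 2 : Nat) : Int) := by
      refine Finset.sum_congr rfl ?_
      intro x hx
      have hxg : x ≠ g := (Finset.mem_erase.mp hx).1
      simp [List.count_erase_of_ne hxg, Ne.symm hxg]
    rw [hcongr]
    have h1 : (t.erase g).count g = t.count g - 1 := List.count_erase_self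
    have h2 : (g :: t).count g = t.count g + 1 := List.count_cons_self
    have hpos : 1 ≤ t.count g := List.one_le_count_iff.mpr hg
    have harith : ((g :: t).count g / 2 : Nat) = ((t.erase g).count g / 2 : Nat) + 1 := by
      rw [h1, h2]; omega
    rw [harith]
    push_cast
    ring
  | case3 g t hc ih =>
    rw [solution]
    simp only [hc, if_false, ih]
    simp only [List.erase_cons_head] at *
    have h2 : (g :: t).count g = t.count g + 1 := List.count_cons_self
    rw [h2] at hc
    have hg : g ∉ t := by
      intro hgm
      have := List.one_le_count_iff.mpr hgm
      omega
    have hct : t.count g = 0 := List.count_eq_zero_of_not_mem hg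
    unfold pairSum
    rw [List.toFinset_cons, Finset.sum_insert (by simp [hg])]
    have hgterm : ((g :: t).count g / 2) = 0 := by rw [h2, hct]
    rw [hgterm]
    simp only [Nat.cast_zero, zero_add]
    refine Finset.sum_congr rfl ?_
    intro x hx
    have hxg : x ≠ g := by
      rintro rfl; exact hg (List.mem_toFinset.mp hx)
    simp [Ne.symm hxg]

lemma solution_alt_eq_pairSum (l : List String) : solution_alt l = pairSum l := by
  simp only [solution_alt]
  rw [PySem.Dict.foldl_insert_getD_add_one_eq_counter,
      PySem.Dict.values_eq_map_keys _ (PySem.Dict.nodup_keys_counter _) 0,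
      PySem.Dict.keys_counter]
  rw [List.map_map]
  have hfun : (List.map ((fun c => PySem.Int.floordiv c 2) ∘ fun k => (PySem.Dict.counter l.reverse).getD k 0)
        (PySem.Set.ofList l.reverse))
      = List.map (fun k => ((l.count k / 2 : Nat) : Int)) (PySem.Set.ofList l.reverse) := by
    refine List.map_congr_left ?_
    intro k _
    simp only [Function.comp_apply, PySem.Dict.getD_counter, List.count_reverse]
    exact_mod_cast PySem.Int.floordiv_natCast (l.count k) 2
  rw [hfun]
  rw [← List.sum_toFinset _ (PySem.Set.nodup_ofList l.reverse)]
  have hfs : (PySem.Set.ofList l.reverse : List String).toFinset = l.toFinset := by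
    ext x
    simp [PySem.Set.mem_ofList]
  rw [hfs]
  rfl

-- ===== VERDICT (by name: the statement is the Claim_ definition above) =====
theorem solution_spec : Claim_equal_solution := by
  intro gloves _
  unfold Spec_solution
  rw [solution_eq_pairSum, solution_alt_eq_pairSum]
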